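-- pv_equiv track=rewrite | github.com/james-ralph8555/fdnix | packages/containers/nixpkgs-indexer/src/nixpkgs_extractor.py | _classify_by_attribute_path
-- ===== SOURCE A (Python) =====
-- def _classify_by_attribute_path(pkg_path: str) -> str:
--     """Classify package category based on attribute path patterns."""
--     path_lower = pkg_path.lower()
--
--     # Language-specific packages
--     if any(x in path_lower for x in ["python", "python3packages", "python2packages"]):
--         return "python"
--     if any(x in path_lower for x in ["haskellpackages", "haskell.packages"]):
--         return "haskell"
--     if "nodepackages" in path_lower or "node_" in path_lower:
--         return "javascript"
--     if "rpackages" in path_lower: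
--         return "r"
--     if any(x in path_lower for x in ["perlpackages", "perl5", "perl."]):
--         return "perl"
--     if any(x in path_lower for x in ["rubypackages", "rubygems"]):
--         return "ruby"
--     if any(x in path_lower for x in ["ocamlpackages", "ocaml-"]):
--         return "ocaml"
--     if any(x in path_lower for x in ["lua", "luapackages"]):
--         return "lua"
--     if any(x in path_lower for x in ["go-modules", "buildgomodule"]):
--         return "go"
--     if "rustpackages" in path_lower or "cargo" in path_lower:
--         return "rust"
--
--     # Application categories
--     if any(x in path_lower for x in ["editor", "vim", "emacs", "nano", "helix"]):
--         return "editors"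
--     if any(x in path_lower for x in ["browser", "firefox", "chrome", "webkit"]):
--         return "browsers"
--     if any(x in path_lower for x in ["game", "steam", "lutris"]):
--         return "games"
--     if any(x in path_lower for x in ["server", "nginx", "apache", "httpd", "postgresql", "mysql"]):
--         return "servers"
--     if any(x in path_lower for x in ["font", "fonts", "ttf", "otf"]):
--         return "fonts"
--     if any(x in path_lower for x in ["theme", "gtk", "qt", "icon"]):
--         return "themes"
--     if any(x in path_lower for x in ["media", "video", "audio", "vlc", "ffmpeg"]):
--         return "multimedia"
--     if any(x in path_lower for x in ["office", "libreoffice", "document"]):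
--         return "office"
--     if any(x in path_lower for x in ["science", "math", "research", "latex"]):
--         return "science"
--     if any(x in path_lower for x in ["graphic", "image", "gimp", "inkscape", "photo"]):
--         return "graphics"
--     if any(x in path_lower for x in ["network", "curl", "wget", "ssh", "tcp"]):
--         return "networking"
--     if any(x in path_lower for x in ["system", "systemd", "util", "coreutils"]):
--         return "system"
--     if any(x in path_lower for x in ["security", "crypto", "ssl", "gpg", "password"]):
--         return "security"
--     if any(x in path_lower for x in ["backup", "rsync", "sync"]):
--         return "backup"
--     if any(x in path_lower for x in ["filesystem", "fuse", "mount"]):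
--         return "filesystems"
--     if any(x in path_lower for x in ["compiler", "gcc", "clang", "llvm"]):
--         return "compilers"
--     if any(x in path_lower for x in ["interpreter", "runtime"]):
--         return "interpreters"
--     if any(x in path_lower for x in ["lib", "library", "shared"]):
--         return "libraries"
--     if any(x in path_lower for x in ["tool", "util", "cli"]):
--         return "tools"
--     if any(x in path_lower for x in ["devel", "dev", "build", "make", "cmake"]):
--         return "development"
--
--     return "misc"
-- ===== SOURCE B (Python) =====
-- # Flat min-priority reduction over a pattern table instead of an ordered cascade.
-- _CATEGORIES = ['python', 'haskell', 'javascript', 'r', 'perl', 'ruby', 'ocaml', 'lua', 'go', 'rust', 'editors', 'browsers', 'games', 'servers', 'fonts', 'themes', 'multimedia', 'office', 'science', 'graphics', 'networking', 'system', 'security', 'backup', 'filesystems', 'compilers', 'interpreters', 'libraries', 'tools', 'development']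
--
-- # Every (pattern, rule-priority) pair, flattened; duplicates (e.g. "util") keep both priorities.
-- _PATTERNS = [
--     ('python', 0),
--     ('python3packages', 0),
--     ('python2packages', 0),
--     ('haskellpackages', 1),
--     ('haskell.packages', 1),
--     ('nodepackages', 2),
--     ('node_', 2),
--     ('rpackages', 3),
--     ('perlpackages', 4),
--     ('perl5', 4),
--     ('perl.', 4),
--     ('rubypackages', 5),
--     ('rubygems', 5),
--     ('ocamlpackages', 6),
--     ('ocaml-', 6),
--     ('lua', 7),
--     ('luapackages', 7),
--     ('go-modules', 8),
--     ('buildgomodule', 8),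
--     ('rustpackages', 9),
--     ('cargo', 9),
--     ('editor', 10),
--     ('vim', 10),
--     ('emacs', 10),
--     ('nano', 10),
--     ('helix', 10),
--     ('browser', 11),
--     ('firefox', 11),
--     ('chrome', 11),
--     ('webkit', 11),
--     ('game', 12),
--     ('steam', 12),
--     ('lutris', 12),
--     ('server', 13),
--     ('nginx', 13),
--     ('apache', 13),
--     ('httpd', 13),
--     ('postgresql', 13),
--     ('mysql', 13),
--     ('font', 14),
--     ('fonts', 14),
--     ('ttf', 14),
--     ('otf', 14),
--     ('theme', 15),
--     ('gtk', 15),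
--     ('qt', 15),
--     ('icon', 15),
--     ('media', 16),
--     ('video', 16),
--     ('audio', 16),
--     ('vlc', 16),
--     ('ffmpeg', 16),
--     ('office', 17),
--     ('libreoffice', 17),
--     ('document', 17),
--     ('science', 18),
--     ('math', 18),
--     ('research', 18),
--     ('latex', 18),
--     ('graphic', 19),
--     ('image', 19),
--     ('gimp', 19),
--     ('inkscape', 19),
--     ('photo', 19),
--     ('network', 20),
--     ('curl', 20),
--     ('wget', 20),
--     ('ssh', 20),
--     ('tcp', 20),
--     ('system', 21),
--     ('systemd', 21),
--     ('util', 21),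
--     ('coreutils', 21),
--     ('security', 22),
--     ('crypto', 22),
--     ('ssl', 22),
--     ('gpg', 22),
--     ('password', 22),
--     ('backup', 23),
--     ('rsync', 23),
--     ('sync', 23),
--     ('filesystem', 24),
--     ('fuse', 24),
--     ('mount', 24),
--     ('compiler', 25),
--     ('gcc', 25),
--     ('clang', 25),
--     ('llvm', 25),
--     ('interpreter', 26),
--     ('runtime', 26),
--     ('lib', 27),
--     ('library', 27),
--     ('shared', 27),
--     ('tool', 28),
--     ('util', 28),
--     ('cli', 28),
--     ('devel', 29),
--     ('dev', 29),
--     ('build', 29),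
--     ('make', 29),
--     ('cmake', 29),
-- ]
--
--
-- def _classify_by_attribute_path(pkg_path: str) -> str:
--     """Classify package category based on attribute path patterns."""
--     path_lower = pkg_path.lower()
--     best = len(_CATEGORIES)  # sentinel: no match yet
--     for pattern, prio in _PATTERNS:
--         if prio < best and pattern in path_lower:
--             best = prio
--     return _CATEGORIES[best] if best < len(_CATEGORIES) else "misc"
-- ===== Notes on version B (the rewrite author's own statement) =====
-- stated objective: alternative
-- what changed: Replaces the ordered 30-branch first-match cascade with a min-reduction: one pass over a flat (pattern, priority) table keeps the smallest priority of any matching pattern, and the category list is indexed by that priority (sentinel = misc).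
import Mathlib
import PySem

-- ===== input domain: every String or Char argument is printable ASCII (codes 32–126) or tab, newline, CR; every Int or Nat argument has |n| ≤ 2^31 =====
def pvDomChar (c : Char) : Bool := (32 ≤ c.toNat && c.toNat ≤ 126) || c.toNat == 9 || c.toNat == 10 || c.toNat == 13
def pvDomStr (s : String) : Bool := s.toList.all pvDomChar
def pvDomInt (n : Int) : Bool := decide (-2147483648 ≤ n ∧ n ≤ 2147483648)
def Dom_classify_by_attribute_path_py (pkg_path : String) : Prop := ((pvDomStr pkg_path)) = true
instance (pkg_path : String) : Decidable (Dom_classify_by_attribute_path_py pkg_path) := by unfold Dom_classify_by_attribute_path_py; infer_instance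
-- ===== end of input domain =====

-- B replaces A's ordered 30-branch first-match cascade by a min-priority reduction over a flat (pattern, priority) table, indexing a category list (objective: alternative).


-- ===== PORT A =====
def classify_by_attribute_path_py (pkg_path : String) : String :=
  let path_lower := PySem.Str.lower pkg_path
  if (["python", "python3packages", "python2packages"] : List String).any (fun x => PySem.Str.isIn x path_lower) then "python"
  else
  if (["haskellpackages", "haskell.packages"] : List String).any (fun x => PySem.Str.isIn x path_lower) then "haskell"
  else
  if PySem.Str.isIn "nodepackages" path_lower || PySem.Str.isIn "node_" path_lower then "javascript"
  else
  if PySem.Str.isIn "rpackages" path_lower then "r"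
  else
  if (["perlpackages", "perl5", "perl."] : List String).any (fun x => PySem.Str.isIn x path_lower) then "perl"
  else
  if (["rubypackages", "rubygems"] : List String).any (fun x => PySem.Str.isIn x path_lower) then "ruby"
  else
  if (["ocamlpackages", "ocaml-"] : List String).any (fun x => PySem.Str.isIn x path_lower) then "ocaml"
  else
  if (["lua", "luapackages"] : List String).any (fun x => PySem.Str.isIn x path_lower) then "lua"
  else
  if (["go-modules", "buildgomodule"] : List String).any (fun x => PySem.Str.isIn x path_lower) then "go"
  else
  if PySem.Str.isIn "rustpackages" path_lower || PySem.Str.isIn "cargo" path_lower then "rust"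
  else
  if (["editor", "vim", "emacs", "nano", "helix"] : List String).any (fun x => PySem.Str.isIn x path_lower) then "editors"
  else
  if (["browser", "firefox", "chrome", "webkit"] : List String).any (fun x => PySem.Str.isIn x path_lower) then "browsers"
  else
  if (["game", "steam", "lutris"] : List String).any (fun x => PySem.Str.isIn x path_lower) then "games"
  else
  if (["server", "nginx", "apache", "httpd", "postgresql", "mysql"] : List String).any (fun x => PySem.Str.isIn x path_lower) then "servers"
  else
  if (["font", "fonts", "ttf", "otf"] : List String).any (fun x => PySem.Str.isIn x path_lower) then "fonts"
  else
  if (["theme", "gtk", "qt", "icon"] : List String).any (fun x => PySem.Str.isIn x path_lower) then "themes"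
  else
  if (["media", "video", "audio", "vlc", "ffmpeg"] : List String).any (fun x => PySem.Str.isIn x path_lower) then "multimedia"
  else
  if (["office", "libreoffice", "document"] : List String).any (fun x => PySem.Str.isIn x path_lower) then "office"
  else
  if (["science", "math", "research", "latex"] : List String).any (fun x => PySem.Str.isIn x path_lower) then "science"
  else
  if (["graphic", "image", "gimp", "inkscape", "photo"] : List String).any (fun x => PySem.Str.isIn x path_lower) then "graphics"
  else
  if (["network", "curl", "wget", "ssh", "tcp"] : List String).any (fun x => PySem.Str.isIn x path_lower) then "networking"
  else
  if (["system", "systemd", "util", "coreutils"] : List String).any (fun x => PySem.Str.isIn x path_lower) then "system"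
  else
  if (["security", "crypto", "ssl", "gpg", "password"] : List String).any (fun x => PySem.Str.isIn x path_lower) then "security"
  else
  if (["backup", "rsync", "sync"] : List String).any (fun x => PySem.Str.isIn x path_lower) then "backup"
  else
  if (["filesystem", "fuse", "mount"] : List String).any (fun x => PySem.Str.isIn x path_lower) then "filesystems"
  else
  if (["compiler", "gcc", "clang", "llvm"] : List String).any (fun x => PySem.Str.isIn x path_lower) then "compilers"
  else
  if (["interpreter", "runtime"] : List String).any (fun x => PySem.Str.isIn x path_lower) then "interpreters"
  else
  if (["lib", "library", "shared"] : List String).any (fun x => PySem.Str.isIn x path_lower) then "libraries"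
  else
  if (["tool", "util", "cli"] : List String).any (fun x => PySem.Str.isIn x path_lower) then "tools"
  else
  if (["devel", "dev", "build", "make", "cmake"] : List String).any (fun x => PySem.Str.isIn x path_lower) then "development"
  else
  "misc"

-- ===== PORT B =====
def pvCats : List String := ["python", "haskell", "javascript", "r", "perl", "ruby", "ocaml", "lua", "go", "rust", "editors", "browsers", "games", "servers", "fonts", "themes", "multimedia", "office", "science", "graphics", "networking", "system", "security", "backup", "filesystems", "compilers", "interpreters", "libraries", "tools", "development"]

def pvPats : List (String × Nat) := [
  ("python", 0),
  ("python3packages", 0),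
  ("python2packages", 0),
  ("haskellpackages", 1),
  ("haskell.packages", 1),
  ("nodepackages", 2),
  ("node_", 2),
  ("rpackages", 3),
  ("perlpackages", 4),
  ("perl5", 4),
  ("perl.", 4),
  ("rubypackages", 5),
  ("rubygems", 5),
  ("ocamlpackages", 6),
  ("ocaml-", 6),
  ("lua", 7),
  ("luapackages", 7),
  ("go-modules", 8),
  ("buildgomodule", 8),
  ("rustpackages", 9),
  ("cargo", 9),
  ("editor", 10),
  ("vim", 10),
  ("emacs", 10),
  ("nano", 10),
  ("helix", 10),
  ("browser", 11),
  ("firefox", 11),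
  ("chrome", 11),
  ("webkit", 11),
  ("game", 12),
  ("steam", 12),
  ("lutris", 12),
  ("server", 13),
  ("nginx", 13),
  ("apache", 13),
  ("httpd", 13),
  ("postgresql", 13),
  ("mysql", 13),
  ("font", 14),
  ("fonts", 14),
  ("ttf", 14),
  ("otf", 14),
  ("theme", 15),
  ("gtk", 15),
  ("qt", 15),
  ("icon", 15),
  ("media", 16),
  ("video", 16),
  ("audio", 16),
  ("vlc", 16),
  ("ffmpeg", 16),
  ("office", 17),
  ("libreoffice", 17),
  ("document", 17),
  ("science", 18),
  ("math", 18),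
  ("research", 18),
  ("latex", 18),
  ("graphic", 19),
  ("image", 19),
  ("gimp", 19),
  ("inkscape", 19),
  ("photo", 19),
  ("network", 20),
  ("curl", 20),
  ("wget", 20),
  ("ssh", 20),
  ("tcp", 20),
  ("system", 21),
  ("systemd", 21),
  ("util", 21),
  ("coreutils", 21),
  ("security", 22),
  ("crypto", 22),
  ("ssl", 22),
  ("gpg", 22),
  ("password", 22),
  ("backup", 23),
  ("rsync", 23),
  ("sync", 23),
  ("filesystem", 24),
  ("fuse", 24),
  ("mount", 24),
  ("compiler", 25),
  ("gcc", 25),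
  ("clang", 25),
  ("llvm", 25),
  ("interpreter", 26),
  ("runtime", 26),
  ("lib", 27),
  ("library", 27),
  ("shared", 27),
  ("tool", 28),
  ("util", 28),
  ("cli", 28),
  ("devel", 29),
  ("dev", 29),
  ("build", 29),
  ("make", 29),
  ("cmake", 29)]

def classify_by_attribute_path_py_alt (pkg_path : String) : String :=
  let path_lower := PySem.Str.lower pkg_path
  let best := pvPats.foldl
    (fun b t => if t.2 < b && PySem.Str.isIn t.1 path_lower then t.2 else b)
    pvCats.length
  if best < pvCats.length then pvCats.getD best "misc" else "misc"

-- ===== PRECONDITION & SPEC =====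
def Spec_classify_by_attribute_path_py (pkg_path : String) (out : String) : Prop := out = classify_by_attribute_path_py_alt pkg_path
instance (pkg_path : String) (out : String) : Decidable (Spec_classify_by_attribute_path_py pkg_path out) := by unfold Spec_classify_by_attribute_path_py; infer_instance

-- ===== CLAIM =====
def Claim_equal_classify_by_attribute_path_py : Prop := ∀ (pkg_path : String), Dom_classify_by_attribute_path_py pkg_path → Spec_classify_by_attribute_path_py pkg_path (classify_by_attribute_path_py pkg_path)

-- ===== LEMMAS AND PROOFS =====

-- B's fold step, with the match test abstracted to a predicate f
def pvStep (f : String × Nat → Bool) (b : Nat) (t : String × Nat) : Nat :=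
  if t.2 < b && f t then t.2 else b

-- the common normal form both ports are reduced to: first entry satisfying f gives its category
def pvFirstCat (f : String × Nat → Bool) : List (String × Nat) → String
  | [] => "misc"
  | t :: ts => if f t then pvCats.getD t.2 "misc" else pvFirstCat f ts

theorem pv_fold_stops (f : String × Nat → Bool) (l : List (String × Nat)) (b : Nat)
    (h : ∀ t ∈ l, b ≤ t.2) : l.foldl (pvStep f) b = b := by
  induction l with
  | nil => rfl
  | cons t ts ih =>
    have hb : pvStep f b t = b := by
      unfold pvStep
      have : ¬ t.2 < b := not_lt.mpr (h t (by simp))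
      simp [this]
    simp only [List.foldl_cons, hb]
    exact ih (fun u hu => h u (by simp [hu]))

theorem pv_fold_first (f : String × Nat → Bool) (s : Nat) (l : List (String × Nat))
    (hp : l.Pairwise (fun a b => a.2 ≤ b.2)) (hs : ∀ t ∈ l, t.2 < s) :
    l.foldl (pvStep f) s = ((l.find? f).map (·.2)).getD s := by
  induction l with
  | nil => rfl
  | cons t ts ih =>
    rcases List.pairwise_cons.mp hp with ⟨hhead, htail⟩
    by_cases hm : f t = true
    · have hstep : pvStep f s t = t.2 := by
        unfold pvStep; simp [hm, hs t (by simp)]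
      simp only [List.foldl_cons, hstep]
      rw [pv_fold_stops f ts t.2 hhead]
      simp [List.find?, hm]
    · have hstep : pvStep f s t = s := by
        unfold pvStep; simp [hm]
      simp only [List.foldl_cons, hstep]
      rw [ih htail (fun u hu => hs u (by simp [hu]))]
      simp [List.find?, hm]

theorem pv_firstCat_find (f : String × Nat → Bool) (l : List (String × Nat)) :
    pvFirstCat f l =
      match l.find? f with
      | some t => pvCats.getD t.2 "misc"
      | none => "misc" := by
  induction l with
  | nil => rfl
  | cons t ts ih =>
    by_cases hm : f t = true
    · simp [pvFirstCat, List.find?, hm]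
    · simp [pvFirstCat, List.find?, hm, ih]

theorem pv_B_eq (pkg_path : String) :
    classify_by_attribute_path_py_alt pkg_path =
      pvFirstCat (fun t => PySem.Str.isIn t.1 (PySem.Str.lower pkg_path)) pvPats := by
  have hpair : pvPats.Pairwise (fun a b => a.2 ≤ b.2) := by decide
  have hlt : ∀ t ∈ pvPats, t.2 < pvCats.length := by decide
  have hfold := pv_fold_first (fun t => PySem.Str.isIn t.1 (PySem.Str.lower pkg_path))
      pvCats.length pvPats hpair hlt
  show (if (pvPats.foldl (pvStep (fun t => PySem.Str.isIn t.1 (PySem.Str.lower pkg_path))) pvCats.length) < pvCats.length then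
      pvCats.getD (pvPats.foldl (pvStep (fun t => PySem.Str.isIn t.1 (PySem.Str.lower pkg_path))) pvCats.length) "misc" else "misc") = _
  rw [hfold, pv_firstCat_find]
  simp only [PySem.Str.isIn, PySem.Str.toList_lower]
  rcases hf : pvPats.find? (fun t => PySem.Chars.isIn t.1.toList (PySem.Chars.lower pkg_path.toList)) with _ | t
  · rw [hf]; simp
  · have ht : t ∈ pvPats := List.mem_of_find?_eq_some hf
    rw [hf]; simp [hlt t ht]

theorem pv_if_or (a b : Bool) (x y : String) :
    (if (a || b) = true then x else y) = if a = true then x else if b = true then x else y := by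
  cases a <;> cases b <;> simp

theorem pv_A_eq (pkg_path : String) :
    classify_by_attribute_path_py pkg_path =
      pvFirstCat (fun t => PySem.Str.isIn t.1 (PySem.Str.lower pkg_path)) pvPats := by
  unfold classify_by_attribute_path_py
  simp only [pvPats, pvFirstCat, List.any_cons, List.any_nil, Bool.or_false, pv_if_or]
  simp [pvCats, List.getD]

-- ===== VERDICT =====
theorem classify_by_attribute_path_py_spec : Claim_equal_classify_by_attribute_path_py := by
  intro pkg_path _
  unfold Spec_classify_by_attribute_path_py
  rw [pv_A_eq, pv_B_eq]
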